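-- pv_equiv track=rewrite | github.com/ksayee/programming_assignments | python/CodingExercises/Testing.py | GroupOccurences
-- ===== SOURCE A (Python) =====
-- import collections
--
-- def GroupOccurences(str):
--
--     dict=collections.Counter(str)
--
--     lst=list(str)
--     fnl_lst=[]
--     for i in range(0,len(lst)):
--         key=lst[i]
--
--         while key in dict.keys() and dict.get(key)>0:
--             fnl_lst.append(key)
--             dict[key]=dict.get(key)-1
--     return ''.join(fnl_lst)
-- ===== SOURCE B (Python) =====
-- def GroupOccurences(str):
--     order = {c: i for i, c in enumerate(dict.fromkeys(str))}
--     return ''.join(sorted(str, key=lambda c: order[c]))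
-- ===== Notes on version B (the rewrite author's own statement) =====
-- stated objective: idiomatic
-- what changed: Replaces the Counter-plus-drain-while mutation loop by a first-occurrence rank index (dict.fromkeys) and a single stable sort keyed by that rank.
import Mathlib
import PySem

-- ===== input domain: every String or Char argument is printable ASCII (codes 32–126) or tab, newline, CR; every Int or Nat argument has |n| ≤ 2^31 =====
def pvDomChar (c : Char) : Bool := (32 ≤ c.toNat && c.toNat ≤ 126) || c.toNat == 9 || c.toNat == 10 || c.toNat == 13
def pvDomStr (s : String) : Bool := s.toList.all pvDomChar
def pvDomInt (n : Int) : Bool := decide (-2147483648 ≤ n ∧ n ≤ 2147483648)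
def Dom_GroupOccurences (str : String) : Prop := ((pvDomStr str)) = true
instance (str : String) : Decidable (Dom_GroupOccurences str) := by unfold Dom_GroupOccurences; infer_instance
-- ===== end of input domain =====

-- B replaces A's Counter-plus-drain-while mutation loop by a first-occurrence rank index and one
-- stable sort keyed by that rank (objective: idiomatic; not claimed faster).


-- ===== PORT A =====
-- 'while key in dict.keys() and dict.get(key)>0: fnl_lst.append(key); dict[key]=dict.get(key)-1'
-- (dict.get(key) is unwrapped with default 0 only under the 'key in dict.keys()' guard, exactly
-- mirroring Python's short-circuit: the default is never read when the guard holds)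
def pvDrain (key : Char) (d : PySem.Dict Char Int) (acc : List Char) :
    List Char × PySem.Dict Char Int :=
  if _ : d.contains key = true ∧ 0 < (d.get? key).getD 0 then
    pvDrain key (d.insert key ((d.get? key).getD 0 - 1)) (acc ++ [key])
  else
    (acc, d)
termination_by ((d.get? key).getD 0).toNat
decreasing_by
  simp only [PySem.Dict.get?_insert_self, Option.getD_some]
  omega

def GroupOccurences (str : String) : String :=
  let dict := PySem.Dict.counter str.toList
  let lst := str.toList
  -- fnl_lst = []; for i in range(0, len(lst)): key = lst[i]; <drain loop>
  -- lst[i]: i is always in range, so the pyGetD default ' ' is never read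
  let res := (PySem.List.pyRange 0 (PySem.List.len lst)).foldl
    (fun (st : List Char × PySem.Dict Char Int) i =>
      pvDrain (PySem.List.pyGetD lst i ' ') st.2 st.1)
    ([], dict)
  String.mk res.1

-- ===== PORT B =====
def GroupOccurences_alt (str : String) : String :=
  -- order = {c: i for i, c in enumerate(dict.fromkeys(str))}
  let order := (PySem.List.enumerate (PySem.List.dedup str.toList) 0).foldl
    (fun (d : PySem.Dict Char Int) p => d.insert p.2 p.1) PySem.Dict.empty
  -- order[c]: every character of str is a key of order, so the getD default 0 is never read
  String.mk (PySem.List.sorted str.toList (fun c => order.getD c 0))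

-- ===== PRECONDITION & SPEC =====
def Spec_GroupOccurences (str : String) (out : String) : Prop := out = GroupOccurences_alt str
instance (str : String) (out : String) : Decidable (Spec_GroupOccurences str out) := by unfold Spec_GroupOccurences; infer_instance

-- ===== CLAIM (what is proved, stated in full; the proofs are below) =====
def Claim_equal_GroupOccurences : Prop := ∀ (str : String), Dom_GroupOccurences str → Spec_GroupOccurences str (GroupOccurences str)

-- ===== LEMMAS AND PROOFS =====

-- Canonical value both programs compute: the distinct characters in first-occurrence order,
-- each repeated as often as it occurs.
def pvCanon (l : List Char) : List Char :=
  (PySem.List.dedup l).flatMap (fun c => List.replicate (List.count c l) c)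

lemma pv_counter_get? (xs : List Char) (c : Char) :
    (PySem.Dict.counter xs).get? c = if c ∈ xs then some ((List.count c xs : Int)) else none := by
  by_cases hc : c ∈ xs
  · have hcont : (PySem.Dict.counter xs).contains c = true := by
      rw [PySem.Dict.contains_iff_mem_keys, PySem.Dict.keys_counter]
      exact (PySem.Set.mem_ofList _ _).2 hc
    rw [PySem.Dict.contains_eq_isSome_get?] at hcont
    obtain ⟨v, hv⟩ := Option.isSome_iff_exists.1 hcont
    have := PySem.Dict.getD_counter xs c
    rw [PySem.Dict.getD_eq_get?_getD, hv] at this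
    simp at this
    simp [hc, hv, this]
  · have hcont : (PySem.Dict.counter xs).contains c = false := by
      rw [PySem.Dict.contains_eq_decide_mem_keys, PySem.Dict.keys_counter]
      simp [PySem.Set.mem_ofList, hc]
    rw [PySem.Dict.contains_eq_isSome_get?] at hcont
    simp [hc]
    simpa using hcont

lemma pvDrain_spec (key : Char) :
    ∀ (n : Nat) (v : Int) (d : PySem.Dict Char Int) (acc : List Char),
      d.get? key = some v → 0 ≤ v → v.toNat = n →
      (pvDrain key d acc).1 = acc ++ List.replicate v.toNat key ∧
      ∀ c, (pvDrain key d acc).2.get? c = if c = key then some 0 else d.get? c := by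
  intro n
  induction n with
  | zero =>
    intro v d acc hget hv hn
    have hv0 : v = 0 := by omega
    subst hv0
    have hcond : ¬(d.contains key = true ∧ 0 < (d.get? key).getD 0) := by
      rw [hget]; simp
    rw [pvDrain, dif_neg hcond]
    refine ⟨by simp, fun c => ?_⟩
    split
    · next h => subst h; exact hget
    · rfl
  | succ m ih =>
    intro v d acc hget hv hn
    have hpos : 0 < v := by omega
    rw [pvDrain]
    have hcond : d.contains key = true ∧ 0 < (d.get? key).getD 0 := by
      constructor
      · rw [PySem.Dict.contains_eq_isSome_get?, hget]; rfl
      · rw [hget]; simpa using hpos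
    rw [dif_pos hcond]
    have hget' : (d.insert key ((d.get? key).getD 0 - 1)).get? key = some (v - 1) := by
      rw [hget]; simpa using PySem.Dict.get?_insert_self d key (v - 1)
    have hrec := ih (v - 1) (d.insert key ((d.get? key).getD 0 - 1)) (acc ++ [key]) hget'
      (by omega) (by omega)
    constructor
    · rw [hrec.1]
      have hvm : v.toNat = m + 1 := hn
      have hm : (v - 1).toNat = m := by omega
      rw [hvm, hm, List.append_assoc]
      simp [List.replicate_succ]
    · intro c
      rw [hrec.2 c]
      by_cases hck : c = key
      · simp [hck]
      · rw [if_neg hck, if_neg hck]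
        exact PySem.Dict.get?_insert_of_ne _ _ hck

lemma pv_loopA (L : List Char) :
    ∀ (q p acc : List Char) (d : PySem.Dict Char Int),
      L = p ++ q →
      (∀ c, d.get? c = if c ∈ L then some (if c ∈ p then 0 else (List.count c L : Int)) else none) →
      acc = (PySem.List.dedup p).flatMap (fun c => List.replicate (List.count c L) c) →
      (q.foldl (fun (st : List Char × PySem.Dict Char Int) x => pvDrain x st.2 st.1) (acc, d)).1
        = pvCanon L := by
  intro q
  induction q with
  | nil =>
    intro p acc d hL hinv hacc
    simp only [List.append_nil] at hL
    subst hL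
    simp only [List.foldl_nil]
    rw [hacc]
    rfl
  | cons x q' ih =>
    intro p acc d hL hinv hacc
    have hxL : x ∈ L := by rw [hL]; simp
    set v : Int := if x ∈ p then 0 else (List.count x L : Int) with hv
    have hgx : d.get? x = some v := by rw [hinv x, if_pos hxL]
    have hv0 : 0 ≤ v := by rw [hv]; split <;> simp
    have hdr := pvDrain_spec x v.toNat v d acc hgx hv0 rfl
    simp only [List.foldl_cons]
    rw [ih (p ++ [x]) (pvDrain x d acc).1 (pvDrain x d acc).2]
    · rw [hL, List.append_assoc]; rfl
    · intro c
      rw [hdr.2 c]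
      by_cases hcx : c = x
      · subst hcx
        simp [hxL]
      · rw [hinv c]
        by_cases hcL : c ∈ L
        · simp [hcL, List.mem_append, hcx]
        · simp [hcL, hcx]
    · rw [hdr.1, hacc]
      rw [PySem.List.dedup_eq_ofList, PySem.List.dedup_eq_ofList,
        PySem.Set.ofList_append_singleton, PySem.Set.add_eq_ite]
      by_cases hxp : x ∈ p
      · rw [if_pos ((PySem.Set.mem_ofList _ _).2 hxp)]
        have : v = 0 := by rw [hv, if_pos hxp]
        simp [this]
      · rw [if_neg (fun h => hxp ((PySem.Set.mem_ofList _ _).1 h))]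
        have : v = (List.count x L : Int) := by rw [hv, if_neg hxp]
        simp [this]

lemma pv_A_eq_canon (str : String) : GroupOccurences str = String.mk (pvCanon str.toList) := by
  unfold GroupOccurences
  have hfold := PySem.List.foldl_pyRange_pyGetD (xs := str.toList) (d := ' ')
    (f := fun (st : List Char × PySem.Dict Char Int) x => pvDrain x st.2 st.1)
    (init := ([], PySem.Dict.counter str.toList)) (a := 0) (by norm_num)
  simp only at hfold ⊢
  rw [hfold]
  simp only [Int.toNat_zero, List.drop_zero]
  congr 1
  apply pv_loopA str.toList str.toList [] [] (PySem.Dict.counter str.toList) rfl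
  · intro c
    rw [pv_counter_get? str.toList c]
    simp
  · simp [PySem.List.dedup_eq_ofList, PySem.Set.ofList_nil]

-- B side --------------------------------------------------------------------

lemma pv_order_getD (ks : List Char) (hnd : ks.Nodup) (c : Char) (hc : c ∈ ks) :
    ((PySem.List.enumerate ks 0).foldl (fun (d : PySem.Dict Char Int) p => d.insert p.2 p.1)
        PySem.Dict.empty).getD c 0 = (ks.idxOf c : Int) := by
  have hitems := PySem.Dict.items_foldl_insert_fresh (PySem.List.enumerate ks 0)
    (fun p => p.2) (fun p => p.1) PySem.Dict.empty
    (fun a _ => PySem.Dict.contains_empty _) (by rw [PySem.List.map_snd_enumerate]; exact hnd)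
  have hkeysnd : ((PySem.List.enumerate ks 0).foldl
      (fun (d : PySem.Dict Char Int) p => d.insert p.2 p.1) PySem.Dict.empty).keys.Nodup := by
    exact PySem.Dict.nodup_keys_foldl_insert_key _ _ _ _ (by simp [PySem.Dict.keys_empty])
  apply PySem.Dict.getD_of_mem_items _ _ hkeysnd
  rw [hitems]
  have hlt : ks.idxOf c < ks.length := List.idxOf_lt_length_of_mem hc
  have hmem : ((ks.idxOf c : Int), c) ∈ PySem.List.enumerate ks 0 := by
    rw [PySem.List.mem_enumerate_iff]
    exact ⟨ks.idxOf c, hlt, by simp [List.getElem_idxOf hlt]⟩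
  have hempty : (PySem.Dict.empty : PySem.Dict Char Int).items = [] := rfl
  rw [hempty, List.nil_append]
  exact List.mem_map.2 ⟨_, hmem, rfl⟩

lemma pv_insertBy_middle (before : Char → Char → Bool) (x : Char) :
    ∀ (G H : List Char), (∀ y ∈ G, before x y = false) → (∀ z ∈ H, before x z = true) →
      PySem.List.insertBy before x (G ++ H) = G ++ x :: H := by
  intro G
  induction G with
  | nil =>
    intro H _ hH
    cases H with
    | nil => simp [PySem.List.insertBy]
    | cons z H' => simp [PySem.List.insertBy, hH z (by simp)]
  | cons y G' ih =>
    intro H hG hH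
    simp only [List.cons_append, PySem.List.insertBy, hG y (by simp)]
    simp [ih H (fun y hy => hG y (by simp [hy])) hH]

lemma pv_flatMap_congr {α β : Type} (l : List α) (f g : α → List β)
    (h : ∀ c ∈ l, f c = g c) : l.flatMap f = l.flatMap g := by
  induction l with
  | nil => rfl
  | cons a l ih =>
    simp only [List.flatMap_cons, h a (by simp), ih (fun c hc => h c (by simp [hc]))]

lemma pv_loopB (L : List Char) (key : Char → Int)
    (hk : ∀ x ∈ L, key x = ((PySem.List.dedup L).idxOf x : Int)) :
    ∀ (p : List Char), (∀ x ∈ p, x ∈ L) →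
      (p.foldl (fun acc x => PySem.List.insertBy (fun a b => decide (key a < key b)) x acc) [])
        = (PySem.List.dedup L).flatMap (fun c => p.filter (· == c)) := by
  have hnd : (PySem.List.dedup L).Nodup := PySem.List.nodup_dedup L
  intro p
  induction p using List.reverseRecOn with
  | nil => simp
  | append_singleton p x ih =>
    intro hsub
    have hxL : x ∈ L := hsub x (by simp)
    have hpL : ∀ y ∈ p, y ∈ L := fun y hy => hsub y (by simp [hy])
    rw [List.foldl_append, List.foldl_cons, List.foldl_nil, ih hpL]
    set D := PySem.List.dedup L with hD
    have hxD : x ∈ D := (PySem.List.mem_dedup L x).2 hxL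
    set r := D.idxOf x with hr
    have hrlt : r < D.length := List.idxOf_lt_length_of_mem hxD
    have hDx : D[r] = x := List.getElem_idxOf hrlt
    -- index of any character, from its position
    have hidx : ∀ (j : Nat) (hj : j < D.length), D.idxOf D[j] = j :=
      fun j hj => List.Nodup.idxOf_getElem hnd j hj
    have hsplit : D = D.take (r + 1) ++ D.drop (r + 1) := (List.take_append_drop _ _).symm
    set pf : Char → List Char := fun c => p.filter (· == c) with hpf
    -- every member of a filter group is its character
    have hmemf : ∀ (c y : Char), y ∈ pf c → y = c := by
      intro c y hy
      have := List.of_mem_filter hy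
      simpa using this
    have hG : ∀ y ∈ (D.take (r + 1)).flatMap pf, decide (key x < key y) = false := by
      intro y hy
      obtain ⟨c, hc, hyc⟩ := List.mem_flatMap.1 hy
      have hyc' := hmemf c y hyc
      subst hyc'
      have hyp : y ∈ p := List.mem_of_mem_filter hyc
      obtain ⟨j, hj, hjc⟩ := List.getElem_of_mem hc
      have hj' : j < D.length := lt_of_lt_of_le hj (by simpa using List.length_take_le (r+1) D)
      have hje : (D.take (r+1))[j] = D[j] := List.getElem_take
      have hjr : j < r + 1 := lt_of_lt_of_le hj (by simp)
      have hyD : y = D[j] := by rw [← hjc, hje]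
      have : key y = (j : Int) := by rw [hk y (hpL y hyp), hyD, hidx j hj']
      rw [hk x hxL, ← hr, this]
      simp; omega
    have hH : ∀ z ∈ (D.drop (r + 1)).flatMap pf, decide (key x < key z) = true := by
      intro z hz
      obtain ⟨c, hc, hzc⟩ := List.mem_flatMap.1 hz
      have hzc' := hmemf c z hzc
      subst hzc'
      have hzp : z ∈ p := List.mem_of_mem_filter hzc
      obtain ⟨j, hj, hjc⟩ := List.getElem_of_mem hc
      have hj' : r + 1 + j < D.length := by
        have := List.length_drop (l := D) (i := r + 1); omega
      have hje : (D.drop (r+1))[j] = D[r+1+j] := List.getElem_drop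
      have hzD : z = D[r+1+j] := by rw [← hjc, hje]
      have : key z = ((r + 1 + j : Nat) : Int) := by rw [hk z (hpL z hzp), hzD, hidx _ hj']
      rw [hk x hxL, ← hr, this]
      simp; omega
    -- insert x after its group
    conv_lhs => rw [hsplit, List.flatMap_append]
    rw [pv_insertBy_middle _ x _ _ hG hH]
    -- now compute the RHS
    have hfilter : ∀ c, (p ++ [x]).filter (· == c) = pf c ++ (if x == c then [x] else []) := by
      intro c
      rw [List.filter_append]
      congr 1
      by_cases hxc : x == c
      · simp [hxc]
      · simp at hxc; simp [hxc]
    conv_rhs => rw [hsplit, List.flatMap_append]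
    have htake : D.take (r + 1) = D.take r ++ [x] := by
      rw [← hDx]
      exact List.take_succ_eq_append_getElem hrlt
    -- characters strictly before / after position r differ from x
    have hne_take : ∀ c ∈ D.take r, ¬(x == c) := by
      intro c hc
      obtain ⟨j, hj, hjc⟩ := List.getElem_of_mem hc
      have hj' : j < D.length := lt_of_lt_of_le hj (by simpa using List.length_take_le r D)
      have hjr : j < r := lt_of_lt_of_le hj (by simp)
      have : c = D[j] := by rw [← hjc, List.getElem_take]
      subst this
      simp only [beq_iff_eq]
      intro hxe
      have h2 := hidx _ hj'
      rw [← hxe] at h2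
      omega
    have hne_drop : ∀ c ∈ D.drop (r + 1), ¬(x == c) := by
      intro c hc
      obtain ⟨j, hj, hjc⟩ := List.getElem_of_mem hc
      have hj' : r + 1 + j < D.length := by
        have := List.length_drop (l := D) (i := r + 1); omega
      have : c = D[r+1+j] := by rw [← hjc, List.getElem_drop]
      subst this
      simp only [beq_iff_eq]
      intro hxe
      have h2 := hidx _ hj'
      rw [← hxe] at h2
      omega
    have hdrop_eq : (D.drop (r + 1)).flatMap (fun c => (p ++ [x]).filter (· == c))
        = (D.drop (r + 1)).flatMap pf := by
      apply pv_flatMap_congr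
      intro c hc
      rw [hfilter c, if_neg (by simpa using hne_drop c hc), List.append_nil]
    rw [hdrop_eq]
    have htake_eq : (D.take (r + 1)).flatMap (fun c => (p ++ [x]).filter (· == c))
        = (D.take (r + 1)).flatMap pf ++ [x] := by
      rw [htake, List.flatMap_append, List.flatMap_append]
      have h1 : (D.take r).flatMap (fun c => (p ++ [x]).filter (· == c)) = (D.take r).flatMap pf := by
        apply pv_flatMap_congr
        intro c hc
        rw [hfilter c, if_neg (by simpa using hne_take c hc), List.append_nil]
      rw [h1, List.append_assoc]
      congr 1
      simp [hpf]
    rw [htake_eq]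
    simp

lemma pv_B_eq_canon (str : String) : GroupOccurences_alt str = String.mk (pvCanon str.toList) := by
  unfold GroupOccurences_alt
  simp only
  congr 1
  set L := str.toList with hLdef
  set order := (PySem.List.enumerate (PySem.List.dedup L) 0).foldl
    (fun (d : PySem.Dict Char Int) p => d.insert p.2 p.1) PySem.Dict.empty with horder
  have hk : ∀ x ∈ L, (fun c => order.getD c 0) x = ((PySem.List.dedup L).idxOf x : Int) := by
    intro x hx
    exact pv_order_getD (PySem.List.dedup L) (PySem.List.nodup_dedup L) x
      ((PySem.List.mem_dedup L x).2 hx)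
  rw [PySem.List.sorted_eq_foldl_insertBy]
  rw [pv_loopB L _ hk L (fun x hx => hx)]
  unfold pvCanon
  apply pv_flatMap_congr
  intro c _
  exact List.filter_beq c

-- ===== VERDICT (by name: the statement is the Claim_ definition above) =====
theorem GroupOccurences_spec : Claim_equal_GroupOccurences := by
  intro str _
  unfold Spec_GroupOccurences
  rw [pv_A_eq_canon, pv_B_eq_canon]
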